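-- pv_equiv track=rewrite | github.com/magn3144/Exam-Helper-Scripts | binary_tree_generator.py | binary_tree_adj_list
-- ===== SOURCE A (Python) =====
-- def binary_tree_adj_list(num_leafs):
--     adj_list = []
--     nodes = 2 * num_leafs - 1
--     for i in range(nodes):
--         if i < nodes // 2:
--             adj_list.append([2 * i + 1, 2 * i + 2])
--         else:
--             adj_list.append([])
--     return adj_list
-- ===== SOURCE B (Python) =====
-- def binary_tree_adj_list(num_leafs):
--     # Edge-inverted construction: start from all-empty rows, then walk the
--     # CHILD indices 1..nodes-1 and append each child to its parent's row,
--     # parent recovered by the inverse heap formula (child - 1) // 2.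
--     nodes = 2 * num_leafs - 1
--     adj_list = [[] for _ in range(nodes)]
--     for child in range(1, nodes):
--         adj_list[(child - 1) // 2].append(child)
--     return adj_list
-- ===== Notes on version B (the rewrite author's own statement) =====
-- stated objective: alternative
-- what changed: B inverts the edge direction: it allocates all rows empty and then iterates over child indices 1..nodes-1, appending each child to its parent's row via the inverse heap formula (child-1)//2, instead of A's single pass over nodes computing each node's children with an if/else.
import Mathlib
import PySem

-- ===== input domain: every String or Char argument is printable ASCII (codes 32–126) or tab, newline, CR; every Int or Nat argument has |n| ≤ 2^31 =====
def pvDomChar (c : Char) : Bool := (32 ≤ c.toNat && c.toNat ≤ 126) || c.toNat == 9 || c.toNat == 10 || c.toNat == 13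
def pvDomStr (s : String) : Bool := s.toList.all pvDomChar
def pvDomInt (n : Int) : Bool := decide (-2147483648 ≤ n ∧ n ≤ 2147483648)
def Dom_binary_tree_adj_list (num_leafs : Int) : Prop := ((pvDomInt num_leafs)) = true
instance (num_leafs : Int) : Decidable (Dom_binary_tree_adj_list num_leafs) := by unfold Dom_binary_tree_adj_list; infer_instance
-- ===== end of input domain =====

-- B inverts the edge direction: it allocates all rows empty and then appends each child index
-- 1..nodes-1 to its parent's row via the inverse heap formula (child-1)//2; objective: alternative.


-- ===== PORT A =====
def binary_tree_adj_list (num_leafs : Int) : List (List Int) :=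
  (PySem.List.pyRange 0 (2 * num_leafs - 1) 1).foldl
    (fun adj_list i =>
      if i < PySem.Int.floordiv (2 * num_leafs - 1) 2 then
        adj_list ++ [[2 * i + 1, 2 * i + 2]]
      else
        adj_list ++ [[]])
    []

-- ===== PORT B =====
-- 'adj_list[(child-1)//2].append(child)': the index (child-1)//2 is ≥ 0 (child ≥ 1) and < len(adj_list),
-- so List.modify at the .toNat of that index is exactly Python's in-range indexed append.
def binary_tree_adj_list_alt (num_leafs : Int) : List (List Int) :=
  let nodes := 2 * num_leafs - 1
  let adj_list := (PySem.List.pyRange 0 nodes 1).map (fun _ => ([] : List Int))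
  (PySem.List.pyRange 1 nodes 1).foldl
    (fun adj_list child =>
      adj_list.modify (PySem.Int.floordiv (child - 1) 2).toNat (fun r => r ++ [child]))
    adj_list

-- ===== PRECONDITION & SPEC =====
def Spec_binary_tree_adj_list (num_leafs : Int) (out : List (List Int)) : Prop := out = binary_tree_adj_list_alt num_leafs
instance (num_leafs : Int) (out : List (List Int)) : Decidable (Spec_binary_tree_adj_list num_leafs out) := by unfold Spec_binary_tree_adj_list; infer_instance

-- ===== CLAIM (what is proved, stated in full; the proofs are below) =====
def Claim_equal_binary_tree_adj_list : Prop := ∀ (num_leafs : Int), Dom_binary_tree_adj_list num_leafs → Spec_binary_tree_adj_list num_leafs (binary_tree_adj_list num_leafs)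

-- ===== LEMMAS AND PROOFS =====

-- A's loop, with the branch hoisted into the appended element: it is init ++ a map.
theorem pv_fold_eq_map (n : Int) (L : List Int) (init : List (List Int)) :
    L.foldl
      (fun adj_list i =>
        if i < n then adj_list ++ [[2 * i + 1, 2 * i + 2]] else adj_list ++ [[]])
      init
    = init ++ L.map (fun i => if i < n then [2 * i + 1, 2 * i + 2] else ([] : List Int)) := by
  induction L generalizing init with
  | nil => simp
  | cons a t ih =>
    simp only [List.foldl_cons, List.map_cons]
    split_ifs <;> simp [ih]

-- B's fold of modifies preserves the length.
theorem pv_fold_modify_length (f : Int → Nat) (cs : List Int) (adj : List (List Int)) :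
    (cs.foldl (fun a c => a.modify (f c) (fun r => r ++ [c])) adj).length = adj.length := by
  induction cs generalizing adj with
  | nil => rfl
  | cons c t ih => simp [ih, List.length_modify]

-- Row j of B's fold: the original row j followed by the children routed to j, in order.
theorem pv_fold_modify_getElem (f : Int → Nat) (cs : List Int) (adj : List (List Int))
    (j : Nat) (hj : j < adj.length) :
    (cs.foldl (fun a c => a.modify (f c) (fun r => r ++ [c])) adj)[j]'(by
        rw [pv_fold_modify_length]; exact hj)
    = adj[j] ++ cs.filter (fun c => f c == j) := by
  induction cs generalizing adj with
  | nil => simp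
  | cons c t ih =>
    simp only [List.foldl_cons, List.filter_cons]
    rw [ih (adj.modify (f c) (fun r => r ++ [c])) (by simp [List.length_modify, hj])]
    by_cases h : f c = j
    · simp [h]
    · simp [h]

-- The children routed to row j among 1..nodes-1 (nodes = 2n-1 odd): both of 2j+1, 2j+2 when
-- j is internal (j < n-1), none otherwise.
theorem pv_filter_children (n : Int) (j : Nat) :
    (PySem.List.pyRange 1 (2 * n - 1) 1).filter
      (fun c => (PySem.Int.floordiv (c - 1) 2).toNat == j)
    = if (j : Int) < n - 1 then [2 * (j : Int) + 1, 2 * (j : Int) + 2] else [] := by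
  have hpred : ∀ c : Int, 1 ≤ c →
      (((PySem.Int.floordiv (c - 1) 2).toNat == j) = true ↔
        2 * (j : Int) + 1 ≤ c ∧ c < 2 * (j : Int) + 3) := by
    intro c hc
    have h0 : 0 ≤ PySem.Int.floordiv (c - 1) 2 := by
      rw [PySem.Int.le_floordiv_iff_mul_le (by omega)]; omega
    rw [beq_iff_eq]
    constructor
    · intro h
      have : PySem.Int.floordiv (c - 1) 2 = (j : Int) := by omega
      rw [PySem.Int.floordiv_eq_iff_of_pos (by omega)] at this
      omega
    · intro h
      have : PySem.Int.floordiv (c - 1) 2 = (j : Int) := by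
        rw [PySem.Int.floordiv_eq_iff_of_pos (by omega)]; omega
      omega
  by_cases hj : (j : Int) < n - 1
  · rw [if_pos hj]
    rw [PySem.List.pyRange_one_append 1 (2 * (j : Int) + 1) (2 * n - 1) (by omega) (by omega),
        PySem.List.pyRange_one_append (2 * (j : Int) + 1) (2 * (j : Int) + 3) (2 * n - 1)
          (by omega) (by omega)]
    rw [List.filter_append, List.filter_append]
    have h1 : (PySem.List.pyRange 1 (2 * (j : Int) + 1) 1).filter
        (fun c => (PySem.Int.floordiv (c - 1) 2).toNat == j) = [] := by
      rw [List.filter_eq_nil_iff]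
      intro c hc
      rw [PySem.List.mem_pyRange_one] at hc
      rw [hpred c hc.1]
      omega
    have h3 : (PySem.List.pyRange (2 * (j : Int) + 3) (2 * n - 1) 1).filter
        (fun c => (PySem.Int.floordiv (c - 1) 2).toNat == j) = [] := by
      rw [List.filter_eq_nil_iff]
      intro c hc
      rw [PySem.List.mem_pyRange_one] at hc
      rw [hpred c (by omega)]
      omega
    have h2 : PySem.List.pyRange (2 * (j : Int) + 1) (2 * (j : Int) + 3) 1
        = [2 * (j : Int) + 1, 2 * (j : Int) + 2] := by
      rw [show (2 * (j : Int) + 3) = (2 * (j : Int) + 2) + 1 by ring,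
          PySem.List.pyRange_one_cons (by omega),
          PySem.List.pyRange_one_cons (by omega),
          PySem.List.pyRange_one_eq_nil (by omega)]
      norm_num
      omega
    rw [h1, h3, h2]
    have hc1 := (hpred (2 * (j : Int) + 1) (by omega)).mpr (by omega)
    have hc2 := (hpred (2 * (j : Int) + 2) (by omega)).mpr (by omega)
    rw [List.filter_cons, List.filter_cons, if_pos hc1, if_pos hc2, List.filter_nil]
    simp
  · rw [if_neg hj, List.filter_eq_nil_iff]
    intro c hc
    rw [PySem.List.mem_pyRange_one] at hc
    rw [hpred c hc.1]
    omega

-- ===== VERDICT (by name: the statement is the Claim_ definition above) =====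
theorem binary_tree_adj_list_spec : Claim_equal_binary_tree_adj_list := by
  intro n _
  show binary_tree_adj_list n = binary_tree_adj_list_alt n
  unfold binary_tree_adj_list binary_tree_adj_list_alt
  have hhalf : PySem.Int.floordiv (2 * n - 1) 2 = n - 1 := by
    rw [PySem.Int.floordiv_eq_iff_of_pos (by omega)]; omega
  rw [hhalf, pv_fold_eq_map, List.nil_append]
  have hlenE : ((PySem.List.pyRange 0 (2 * n - 1) 1).map
      (fun _ => ([] : List Int))).length = (2 * n - 1 - 0).toNat := by
    rw [List.length_map, PySem.List.length_pyRange_one]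
  apply List.ext_getElem
  · rw [List.length_map, PySem.List.length_pyRange_one, pv_fold_modify_length, hlenE]
  · intro j h1 h2
    rw [List.getElem_map, PySem.List.getElem_pyRange_one]
    rw [pv_fold_modify_getElem _ _ _ j (by
      rw [hlenE]; rw [List.length_map, PySem.List.length_pyRange_one] at h1; exact h1)]
    rw [List.getElem_map, pv_filter_children, List.nil_append]
    simp only [zero_add]
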